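-- pv_equiv track=rewrite | github.com/rachelannearthur/ElementsOfSoftwareDesign | t2.py | boxesNest
-- ===== SOURCE A (Python) =====
-- def boxesNest(master_list, b, pos):
--   if pos == 2:
--     return True
--   else:
--     for i in range (len(b) - 1):
--       if (master_list[b[i]][pos] < master_list[b[i+1]][pos]):
--         return boxesNest(master_list, b, pos + 1)
--       else:
--         return False
-- ===== SOURCE B (Python) =====
-- def boxesNest(master_list, b, pos):
--     if pos == 2:
--         return True
--     if len(b) < 2:
--         return None
--     lo = master_list[b[0]]
--     hi = master_list[b[1]]
--     for p in range(pos, 2):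
--         if not (lo[p] < hi[p]):
--             return False
--     return True
-- ===== Notes on version B (the rewrite author's own statement) =====
-- stated objective: simpler
-- what changed: Replaces A's tail recursion on pos with a single iterative pass: the two compared rows are fetched once and the coordinates pos..1 are scanned by one for-range loop.
-- outside the precondition, e.g. on boxesNest([[1, 1, 1, 1], [0, 0, 0, 0]], [0, 1], 3): A returns False, B returns True; on boxesNest([[3, 3, 3], [5, 5, 5]], [0, 1], -1): A returns True, B returns True; on boxesNest([[1], [0]], [0, 1], 0): A returns False, B returns False
import Mathlib
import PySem

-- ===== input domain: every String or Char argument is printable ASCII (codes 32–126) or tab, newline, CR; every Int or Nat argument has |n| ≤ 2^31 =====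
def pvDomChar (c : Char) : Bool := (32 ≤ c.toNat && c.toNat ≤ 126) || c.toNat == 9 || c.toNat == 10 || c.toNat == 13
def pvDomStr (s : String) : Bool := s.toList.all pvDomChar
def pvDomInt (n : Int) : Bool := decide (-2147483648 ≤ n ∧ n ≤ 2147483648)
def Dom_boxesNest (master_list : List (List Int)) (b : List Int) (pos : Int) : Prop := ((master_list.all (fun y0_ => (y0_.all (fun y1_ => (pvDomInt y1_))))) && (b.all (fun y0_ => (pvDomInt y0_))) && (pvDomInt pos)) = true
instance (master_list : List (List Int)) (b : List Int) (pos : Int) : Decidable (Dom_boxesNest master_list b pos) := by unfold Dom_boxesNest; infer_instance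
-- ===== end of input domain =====

-- B replaces A's tail recursion on `pos` by a single pass: it fetches the two
-- compared rows once and scans the coordinates pos..1 with a for-range loop
-- (objective: simpler; same cost).

-- ===== PORT A =====
-- A's `for i in range(len(b)-1)` always returns in its first iteration (i = 0),
-- so it is transcribed as: empty range → fall through to None, else the i = 0 body.
-- The Nat `fuel` ((2 - pos).toNat at the entry) is only a totality guard for the
-- recursion on pos; it is never exhausted on inputs satisfying Pre_boxesNest.
def boxesNestGo (master_list : List (List Int)) (b : List Int) (fuel : Nat) (pos : Int) : Option Bool :=
  if pos = 2 then some true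
  else if (b.length : Int) - 1 < 1 then none      -- empty range: falls off the function → None
  else
    match (PySem.List.pyGet? b 0).bind (PySem.List.pyGet? master_list),
          (PySem.List.pyGet? b 1).bind (PySem.List.pyGet? master_list) with
    | some r0, some r1 =>
      match PySem.List.pyGet? r0 pos, PySem.List.pyGet? r1 pos with
      | some x, some y =>
        if x < y then
          match fuel with
          | fuel' + 1 => boxesNestGo master_list b fuel' (pos + 1)
          | 0 => none                             -- totality guard (pos > 2: excluded by Pre_)
        else some false
      | _, _ => none                              -- IndexError (excluded by Pre_)
    | _, _ => none                                -- IndexError (excluded by Pre_)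

def boxesNest (master_list : List (List Int)) (b : List Int) (pos : Int) : Option Bool :=
  boxesNestGo master_list b (2 - pos).toNat pos

-- ===== PORT B =====
def boxesNest_alt (master_list : List (List Int)) (b : List Int) (pos : Int) : Option Bool :=
  if pos = 2 then some true
  else if b.length < 2 then none
  else
    match (PySem.List.pyGet? b 0).bind (PySem.List.pyGet? master_list),
          (PySem.List.pyGet? b 1).bind (PySem.List.pyGet? master_list) with
    | some lo, some hi =>
      (PySem.List.pyRange pos 2 1).foldl
        (fun acc p =>
          match acc with
          | some true =>
            match PySem.List.pyGet? lo p, PySem.List.pyGet? hi p with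
            | some x, some y => some (decide (x < y))
            | _, _ => none                        -- IndexError (excluded by Pre_)
          | other => other)
        (some true)
    | _, _ => none                                -- IndexError (excluded by Pre_)

-- ===== PRECONDITION & SPEC =====
-- Pre_ excludes inputs on which A raises (invalid box/row indices, pos > 2 which
-- recurses until an error) and, narrowing slightly, inputs with pos outside 0..2
-- or with referenced rows shorter than 2 on which A only accidentally returns
-- (an early False at an out-of-range pos, or a negative pos hitting the rows by
-- Python's negative-index wraparound).
def Pre_boxesNest (master_list : List (List Int)) (b : List Int) (pos : Int) : Prop :=
  pos = 2 ∨ b.length < 2 ∨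
  (0 ≤ pos ∧ pos ≤ 2 ∧
   ((PySem.List.pyGet? b 0).bind (PySem.List.pyGet? master_list)).isSome = true ∧
   ((PySem.List.pyGet? b 1).bind (PySem.List.pyGet? master_list)).isSome = true ∧
   2 ≤ (((PySem.List.pyGet? b 0).bind (PySem.List.pyGet? master_list)).getD []).length ∧
   2 ≤ (((PySem.List.pyGet? b 1).bind (PySem.List.pyGet? master_list)).getD []).length)
instance (master_list : List (List Int)) (b : List Int) (pos : Int) : Decidable (Pre_boxesNest master_list b pos) := by unfold Pre_boxesNest; infer_instance

def pvWitness_boxesNest : List (List Int) × List Int × Int := ([[1, 2], [3, 4]], [0, 1], 0)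

def Spec_boxesNest (master_list : List (List Int)) (b : List Int) (pos : Int) (out : Option Bool) : Prop := out = boxesNest_alt master_list b pos
instance (master_list : List (List Int)) (b : List Int) (pos : Int) (out : Option Bool) : Decidable (Spec_boxesNest master_list b pos out) := by unfold Spec_boxesNest; infer_instance

-- ===== CLAIM (what is proved, stated in full; the proofs are below) =====
def Claim_equal_boxesNest : Prop := ∀ (master_list : List (List Int)) (b : List Int) (pos : Int), Dom_boxesNest master_list b pos → Pre_boxesNest master_list b pos → Spec_boxesNest master_list b pos (boxesNest master_list b pos)

-- ===== LEMMAS AND PROOFS =====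

theorem boxesNest_main : ∀ (master_list : List (List Int)) (b : List Int) (pos : Int), Pre_boxesNest master_list b pos → boxesNest master_list b pos = boxesNest_alt master_list b pos := by
  intro ml b pos hpre
  rcases hpre with h2 | hlen | ⟨h0, h2', hs0, hs1, hl0, hl1⟩
  · simp [boxesNest, boxesNestGo, boxesNest_alt, h2]
  · by_cases h2 : pos = 2
    · simp [boxesNest, boxesNestGo, boxesNest_alt, h2]
    · have hlt : (b.length : Int) - 1 < 1 := by omega
      rw [boxesNest, boxesNestGo.eq_def]
      simp [boxesNest_alt, h2, hlt, hlen]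
  · obtain ⟨r0, hr0⟩ := Option.isSome_iff_exists.mp hs0
    obtain ⟨r1, hr1⟩ := Option.isSome_iff_exists.mp hs1
    rw [hr0] at hl0; rw [hr1] at hl1
    simp only [Option.getD_some] at hl0 hl1
    have hb1 : PySem.List.pyGet? b 1 ≠ none := by
      intro h; rw [h] at hs1; simp at hs1
    have hblen : 2 ≤ b.length := by
      rw [Ne, PySem.List.pyGet?_eq_none_iff] at hb1
      have := not_not.mp hb1
      unfold PySem.Raise.InRange at this
      omega
    have hnb : ¬ ((b.length : Int) - 1 < 1) := by omega
    have e00 : PySem.List.pyGet? r0 0 = some r0[0] := by simpa using PySem.List.pyGet?_ofNat (xs := r0) 0 (by omega)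
    have e01 : PySem.List.pyGet? r0 1 = some r0[1] := by simpa using PySem.List.pyGet?_ofNat (xs := r0) 1 (by omega)
    have e10 : PySem.List.pyGet? r1 0 = some r1[0] := by simpa using PySem.List.pyGet?_ofNat (xs := r1) 0 (by omega)
    have e11 : PySem.List.pyGet? r1 1 = some r1[1] := by simpa using PySem.List.pyGet?_ofNat (xs := r1) 1 (by omega)
    have hr01 : PySem.List.pyRange 0 2 1 = [0, 1] := by decide
    have hr11 : PySem.List.pyRange 1 2 1 = [1] := by decide
    interval_cases pos
    · by_cases hc0 : r0[0] < r1[0] <;> by_cases hc1 : r0[1] < r1[1] <;>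
        simp [boxesNest, boxesNestGo, boxesNest_alt, hr0, hr1, hnb, e00, e01, e10, e11, hr01, hc0, hc1] <;> omega
    · by_cases hc1 : r0[1] < r1[1] <;>
        simp [boxesNest, boxesNestGo, boxesNest_alt, hr0, hr1, hnb, e01, e11, hr11, hc1] <;> omega
    · simp [boxesNest, boxesNestGo, boxesNest_alt]

-- ===== VERDICT (by name: the statement is the Claim_ definition above) =====
theorem boxesNest_spec : Claim_equal_boxesNest := by
  intro ml b pos _ hpre
  exact boxesNest_main ml b pos hpre
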